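-- pv_equiv track=rewrite | github.com/umerejaz-techverx/apartment_hunting | apartment_hunting.py | is_possible
-- ===== SOURCE A (Python) =====
-- def generate_dict(req):
--     tmp = dict()
--     for i in req:
--         tmp[i] = None
--     return tmp
--
-- def is_possible(data, req):
--     tmp = generate_dict(req)
--     for i in data:
--         for s_req in req:
--             if not tmp[s_req]:
--                 tmp[s_req] = i.get(s_req)
--     if all(tmp.values()):
--         return True
--     return False
-- ===== SOURCE B (Python) =====
-- def is_possible(data, req):
--     return all(any(apt.get(r) for apt in data) for r in req)
-- ===== Notes on version B (the rewrite author's own statement) =====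
-- stated objective: simpler
-- what changed: Drops the mutated per-requirement dict and the apartment-major double loop; B transposes the traversal to requirement-major and answers with all(any(apt.get(r) for apt in data) for r in req), maintaining no state.
import Mathlib
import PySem

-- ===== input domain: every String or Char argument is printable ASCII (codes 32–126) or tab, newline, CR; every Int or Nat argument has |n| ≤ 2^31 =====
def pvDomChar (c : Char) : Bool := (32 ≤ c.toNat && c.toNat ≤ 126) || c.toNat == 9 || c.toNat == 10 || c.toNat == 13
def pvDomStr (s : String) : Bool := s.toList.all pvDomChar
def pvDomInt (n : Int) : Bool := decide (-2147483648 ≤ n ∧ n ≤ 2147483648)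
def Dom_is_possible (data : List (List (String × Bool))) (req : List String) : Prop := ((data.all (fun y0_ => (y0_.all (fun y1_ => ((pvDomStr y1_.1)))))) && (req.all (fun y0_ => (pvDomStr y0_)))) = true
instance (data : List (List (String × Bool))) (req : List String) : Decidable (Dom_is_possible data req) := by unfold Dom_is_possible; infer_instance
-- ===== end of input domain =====

-- B replaces A's mutated per-requirement dict and apartment-major double loop by a stateless
-- requirement-major all/any scan (objective: simpler).


-- ===== PORT A =====
-- helper of A: tmp = dict(); for i in req: tmp[i] = None
def generate_dict (req : List String) : PySem.Dict String (Option Bool) :=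
  req.foldl (fun tmp i => tmp.insert i none) PySem.Dict.empty

def is_possible (data : List (List (String × Bool))) (req : List String) : Bool :=
  let tmp0 := generate_dict req
  -- for i in data: for s_req in req: if not tmp[s_req]: tmp[s_req] = i.get(s_req)
  -- (tmp[s_req] never raises: every s_req is a key of tmp; getD … none is that lookup)
  let tmp := data.foldl (fun tmp i =>
    req.foldl (fun tmp s_req =>
      if !((tmp.getD s_req none).getD false) then
        tmp.insert s_req ((PySem.Dict.mk i).get? s_req)
      else tmp) tmp) tmp0
  if tmp.values.all (fun v => v.getD false) then true else false

-- ===== PORT B =====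
def is_possible_alt (data : List (List (String × Bool))) (req : List String) : Bool :=
  req.all (fun r => data.any (fun apt => ((PySem.Dict.mk apt).get? r).getD false))

-- ===== PRECONDITION & SPEC =====
def Spec_is_possible (data : List (List (String × Bool))) (req : List String) (out : Bool) : Prop := out = is_possible_alt data req
instance (data : List (List (String × Bool))) (req : List String) (out : Bool) : Decidable (Spec_is_possible data req out) := by unfold Spec_is_possible; infer_instance

-- ===== CLAIM (what is proved, stated in full; the proofs are below) =====
def Claim_equal_is_possible : Prop := ∀ (data : List (List (String × Bool))) (req : List String), Dom_is_possible data req → Spec_is_possible data req (is_possible data req)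

-- ===== LEMMAS AND PROOFS =====

-- every value of generate_dict req is none
lemma getD_gen_none (req : List String) (r : String) :
    (generate_dict req).getD r none = none := by
  unfold generate_dict
  suffices h : ∀ (l : List String) (d : PySem.Dict String (Option Bool)),
      (∀ x, d.getD x none = none) →
      (l.foldl (fun tmp i => tmp.insert i none) d).getD r none = none by
    exact h req PySem.Dict.empty (fun x => by simp [pysem])
  intro l
  induction l with
  | nil => intro d hd; simpa using hd r
  | cons a t ih =>
      intro d hd
      simp only [List.foldl_cons]
      exact ih _ (fun x => by rw [PySem.Dict.getD_insert]; split <;> simp [hd])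

-- keys are unchanged by the inner fold when every element of l is already a key
lemma keys_inner (i : List (String × Bool)) (l : List String) :
    ∀ (d : PySem.Dict String (Option Bool)), (∀ s ∈ l, s ∈ d.keys) →
    (l.foldl (fun tmp s_req =>
      if !((tmp.getD s_req none).getD false) then
        tmp.insert s_req ((PySem.Dict.mk i).get? s_req)
      else tmp) d).keys = d.keys := by
  induction l with
  | nil => intro d _; rfl
  | cons a t ih =>
      intro d hd
      simp only [List.foldl_cons]
      have hstep : (if !((d.getD a none).getD false) then
          d.insert a ((PySem.Dict.mk i).get? a) else d).keys = d.keys := by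
        split
        · exact PySem.Dict.keys_insert_of_contains _ _
            ((PySem.Dict.contains_iff_mem_keys _ _).2 (hd a (by simp)))
        · rfl
      rw [ih _ (fun s hs => by rw [hstep]; exact hd s (by simp [hs])), hstep]

-- keys are unchanged by the outer fold when every element of req is a key
lemma keys_outer (req : List String) (data : List (List (String × Bool))) :
    ∀ (d : PySem.Dict String (Option Bool)), (∀ s ∈ req, s ∈ d.keys) →
    (data.foldl (fun tmp i =>
      req.foldl (fun tmp s_req =>
        if !((tmp.getD s_req none).getD false) then
          tmp.insert s_req ((PySem.Dict.mk i).get? s_req)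
        else tmp) tmp) d).keys = d.keys := by
  induction data with
  | nil => intro d _; rfl
  | cons i t ih =>
      intro d hd
      simp only [List.foldl_cons]
      rw [ih _ (fun s hs => by rw [keys_inner i req d hd]; exact hd s hs),
          keys_inner i req d hd]

-- truthiness of a slot after the inner fold
lemma getD_inner (i : List (String × Bool)) (l : List String) (r : String) :
    ∀ (d : PySem.Dict String (Option Bool)),
    ((l.foldl (fun tmp s_req =>
      if !((tmp.getD s_req none).getD false) then
        tmp.insert s_req ((PySem.Dict.mk i).get? s_req)
      else tmp) d).getD r none).getD false
    = (((d.getD r none).getD false) ||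
       (decide (r ∈ l) && (((PySem.Dict.mk i).get? r).getD false))) := by
  induction l with
  | nil => intro d; simp
  | cons a t ih =>
      intro d
      simp only [List.foldl_cons]
      rw [ih]
      by_cases hra : r = a
      · subst hra
        split
        · rename_i h
          rw [PySem.Dict.getD_insert_self]
          simp only [Bool.not_eq_true'] at h
          rw [h]
          cases ((PySem.Dict.mk i).get? r).getD false <;> simp
        · rename_i h
          simp only [Bool.not_eq_true, Bool.not_eq_false'] at h
          simp [h]
      · have : (if !((d.getD a none).getD false) then
            d.insert a ((PySem.Dict.mk i).get? a) else d).getD r none = d.getD r none := by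
          split
          · exact PySem.Dict.getD_insert_of_ne _ _ _ hra
          · rfl
        rw [this]
        simp [hra]

-- truthiness of a slot after the outer fold: some apartment supplies a truthy value
lemma getD_outer (req : List String) (data : List (List (String × Bool))) (r : String) :
    ∀ (d : PySem.Dict String (Option Bool)),
    ((data.foldl (fun tmp i =>
      req.foldl (fun tmp s_req =>
        if !((tmp.getD s_req none).getD false) then
          tmp.insert s_req ((PySem.Dict.mk i).get? s_req)
        else tmp) tmp) d).getD r none).getD false
    = (((d.getD r none).getD false) ||
       (decide (r ∈ req) && data.any (fun i => ((PySem.Dict.mk i).get? r).getD false))) := by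
  induction data with
  | nil => intro d; simp
  | cons i t ih =>
      intro d
      simp only [List.foldl_cons]
      rw [ih, getD_inner]
      cases (d.getD r none).getD false <;>
        cases hm : decide (r ∈ req) <;> simp [List.any_cons]

theorem is_possible_spec : Claim_equal_is_possible := by
  intro data req _
  unfold Spec_is_possible is_possible is_possible_alt
  dsimp only
  set F := data.foldl (fun tmp i =>
    req.foldl (fun tmp s_req =>
      if !((tmp.getD s_req none).getD false) then
        tmp.insert s_req ((PySem.Dict.mk i).get? s_req)
      else tmp) tmp) (generate_dict req) with hF
  have hmem0 : ∀ s ∈ req, s ∈ (generate_dict req).keys := by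
    intro s hs
    unfold generate_dict
    rw [PySem.Dict.keys_foldl_insert (f := fun _ _ => none)]
    exact (PySem.Set.mem_update _ _ _).2 (Or.inr hs)
  have hkeys : F.keys = PySem.Set.ofList req := by
    rw [hF, keys_outer req data _ hmem0]
    unfold generate_dict
    rw [PySem.Dict.keys_foldl_insert (f := fun _ _ => none)]
    rfl
  have hnd : F.keys.Nodup := by rw [hkeys]; exact PySem.Set.nodup_ofList req
  have hA : ∀ r ∈ req, (F.getD r none).getD false
      = data.any (fun i => ((PySem.Dict.mk i).get? r).getD false) := by
    intro r hr
    rw [hF, getD_outer, getD_gen_none]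
    simp [hr]
  rw [PySem.Dict.values_eq_map_keys F hnd none, hkeys]
  have hif : ∀ b : Bool, (if b = true then true else false) = b := by decide
  rw [hif]
  rw [Bool.eq_iff_iff, List.all_map, List.all_eq_true, List.all_eq_true]
  constructor
  · intro h r hr
    rw [← hA r hr]
    exact h r ((PySem.Set.mem_ofList req r).2 hr)
  · intro h r hr
    have hrm := (PySem.Set.mem_ofList req r).1 hr
    show (F.getD r none).getD false = true
    rw [hA r hrm]
    exact h r hrm
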